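/- GENERATED by mk_final_copies.py from the proof of the farm's unit `decode_residue.8` (farm:decode_residue.8.1: Proof.lean) as the
   re-elaboration sweep compiled it — do not edit. -/
/-
  THE UNIT `decode_residue.8`: path B control of decode_residue (c/stb_vorbis_fixed.c 2257–2261, 2278–2279, 2299).

  The six walks between cut points are in Lemmas.lean (`entry1 entry2 entry3 head6 head7 head35`); here they are composed by
  `ReachVia.trans` into the three clauses of `DecodeResidue.Seg8`. The only loop that runs INSIDE the segment is the pass loop
  with `part_read = 0` (eight empty passes): `empty_passes`, by induction on `8 − pass`.
-/
import Asan.CheckWalk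
import Vorbis.Spec.Units.decode_residue_8
import Vorbis.Spec.Worked.decode_residue_8_Lemmas
open X86 X86.User Asan Vorbis Vorbis.Spec Vorbis.Spec.DecodeResidue

set_option maxRecDepth 4000
set_option maxHeartbeats 4000000

namespace Vorbis.Spec.decode_residue_8

/-- **`part_read = 0`: the passes that are left are empty.** From the head of the pass loop (0x10eeba) with `pass + k = 8` the
machine reaches the trampoline 0x10fafc: every `while` 2259 is left at once (`0 ≥ part_read`), the latch adds 1 to `pass`.
Measure: `8 − pass = k`. -/
theorem empty_passes (Lay : Layout) (hLay : Lay.hi = 0x1000000) (μ : Microarch) (hμ : UserX.MicroOK μ) (u₀ : State)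
    (hcode : HasCodeNat Lay u₀ Vorbis.L.decode_residue.entry Vorbis.Code.code_decode_residue.nat Vorbis.L.decode_residue.size)
    (g : G) (hent : Entered u₀ g) (h0 : g.PRD = 0) :
    ∀ k pass v, pass + k = 8 → A6 u₀ g pass v → ReachVia Lay μ WayInv v (fun v' => At36 u₀ g v') := by
  intro k
  induction k with
  | zero =>
    intro pass v hk h6
    -- pass = 8: `jg` is taken
    refine (head6 Lay hLay μ hμ u₀ hcode g hent pass v h6).trans ?_
    intro v1 h
    rcases h with h36 | ⟨hle, _⟩
    · exact ReachVia.done h36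
    · omega
  | succ k ih =>
    intro pass v hk h6
    refine (head6 Lay hLay μ hμ u₀ hcode g hent pass v h6).trans ?_
    intro v1 h
    rcases h with h36 | ⟨_, h7⟩
    · exact ReachVia.done h36
    · -- the `while` head with `pcount = 0`
      refine (head7 Lay hLay μ hμ u₀ hcode g hent pass 0 0 v1 h7).trans ?_
      intro v2 h
      rcases h with ⟨_, h6'⟩ | ⟨_, h28⟩ | ⟨_, h35⟩
      · exact ih (pass + 1) v2 (by omega) h6'
      · have hlt := h28.lt
        omega
      · have hlt := h35.wi.inner.pcount_le
        have heq := h35.wi.inner.pcount_eq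
        have hst := h35.wi.inner.start_lt
        omega

/-- **Entry 1 of segment 8** (0x10eea8, path B): to the j-loop 2261 of pass 0 with `class_set = pcount = 0`
(`part_read > 0`), or through eight empty passes to the trampoline (`part_read = 0`). -/
theorem seg8_entry1 (Lay : Layout) (hLay : Lay.hi = 0x1000000) (μ : Microarch) (hμ : UserX.MicroOK μ) (u₀ : State)
    (hcode : HasCodeNat Lay u₀ Vorbis.L.decode_residue.entry Vorbis.Code.code_decode_residue.nat Vorbis.L.decode_residue.size)
    (g : G) (hent : Entered u₀ g) (v : State) (hat : At5 u₀ g v) :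
    ReachVia Lay μ WayInv v (fun v' => At28 u₀ g 0 0 v' ∨ At36 u₀ g v') := by
  -- 0x10eea8 → 0x10eeba
  refine (entry1 Lay hLay μ hμ u₀ hcode g hent v hat).trans ?_
  intro v1 h6
  -- 0x10eeba → 0x10eed9 (pass = 0 ≤ 7)
  refine (head6 Lay hLay μ hμ u₀ hcode g hent 0 v1 h6).trans ?_
  intro v2 h
  rcases h with h36 | ⟨_, h7⟩
  · exact ReachVia.done (Or.inr h36)
  · -- 0x10eed9: `0 < part_read` ?
    refine (head7 Lay hLay μ hμ u₀ hcode g hent 0 0 0 v2 h7).trans ?_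
    intro v3 h
    rcases h with ⟨hge, h6'⟩ | ⟨_, h28⟩ | ⟨h1, _⟩
    · -- `part_read = 0`: seven more empty passes
      have h0 : g.PRD = 0 := by omega
      refine (empty_passes Lay hLay μ hμ u₀ hcode g hent h0 7 1 v3 (by omega) h6').trans ?_
      intro v4 h36
      exact ReachVia.done (Or.inr h36)
    · exact ReachVia.done (Or.inl h28)
    · omega

/-- **Entry 2 of segment 8** (0x10f8f8, after the j-loop 2261): into the body of the i-loop 2278 with `i = 0`. -/
theorem seg8_entry2 (Lay : Layout) (hLay : Lay.hi = 0x1000000) (μ : Microarch) (hμ : UserX.MicroOK μ) (u₀ : State)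
    (hcode : HasCodeNat Lay u₀ Vorbis.L.decode_residue.entry Vorbis.Code.code_decode_residue.nat Vorbis.L.decode_residue.size)
    (g : G) (hent : Entered u₀ g) (cs pcount : Nat) (v : State) (hat : At29 u₀ g cs pcount v) :
    ReachVia Lay μ WayInv v (fun v' => At30 u₀ g 0 cs 0 pcount v') := by
  have hW1 := hat.common.w_pos hent
  -- 0x10f8f8 → 0x10faa1
  refine (entry2 Lay hLay μ hμ u₀ hcode g hent cs pcount v hat).trans ?_
  intro v1 h35
  -- 0x10faa1: `0 < classwords` (R7b) and `pcount = class_set·W < part_read`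
  have heq := h35.wi.inner.pcount_eq
  have hst := h35.wi.inner.start_lt
  refine (head35 Lay hLay μ hμ u₀ hcode g hent 0 cs 0 pcount v1 h35).trans ?_
  intro v2 h
  rcases h with h30 | ⟨hex, _⟩
  · exact ReachVia.done h30
  · omega

/-- **Entry 3 of segment 8** (0x10fa8d, the latch of the i-loop 2278): the next `i`; or `++class_set` and the next `while`
turn (pass 0: the j-loop 2261; a pass ≥ 1: the i-loop body with `i = 0`); or the next pass (its first i-loop body); or the
trampoline (`pass = 7`). -/
theorem seg8_entry3 (Lay : Layout) (hLay : Lay.hi = 0x1000000) (μ : Microarch) (hμ : UserX.MicroOK μ) (u₀ : State)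
    (hcode : HasCodeNat Lay u₀ Vorbis.L.decode_residue.entry Vorbis.Code.code_decode_residue.nat Vorbis.L.decode_residue.size)
    (g : G) (hent : Entered u₀ g) (pass cs i pcount : Nat) (v : State) (hat : At34 u₀ g pass cs i pcount v) :
    ReachVia Lay μ WayInv v (fun v' =>
      At30 u₀ g pass cs (i + 1) (pcount + 1) v' ∨
      (pass = 0 ∧ At28 u₀ g (cs + 1) (pcount + 1) v') ∨
      (1 ≤ pass ∧ At30 u₀ g pass (cs + 1) 0 (pcount + 1) v') ∨
      At30 u₀ g (pass + 1) 0 0 0 v' ∨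
      At36 u₀ g v') := by
  have hW1 := hat.common.w_pos hent
  have hlt : pcount < g.PRD := hat.loop.lt
  -- 0x10fa8d → 0x10faa1: `++i, ++pcount`
  refine (entry3 Lay hLay μ hμ u₀ hcode g hent pass cs i pcount v hat).trans ?_
  intro v1 h35
  -- 0x10faa1: the next `i` ?
  refine (head35 Lay hLay μ hμ u₀ hcode g hent pass cs (i + 1) (pcount + 1) v1 h35).trans ?_
  intro v2 h
  rcases h with h30 | ⟨_, h7⟩
  · exact ReachVia.done (Or.inl h30)
  · -- 0x10eed9 with `class_set + 1`: the next `while` turn ?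
    refine (head7 Lay hLay μ hμ u₀ hcode g hent pass (cs + 1) (pcount + 1) v2 h7).trans ?_
    intro v3 h
    rcases h with ⟨_, h6⟩ | ⟨hp0, h28⟩ | ⟨hp1, h35'⟩
    · -- the pass is over: 0x10eeba with `pass + 1`
      refine (head6 Lay hLay μ hμ u₀ hcode g hent (pass + 1) v3 h6).trans ?_
      intro v4 h
      rcases h with h36 | ⟨_, h7'⟩
      · exact ReachVia.done (Or.inr (Or.inr (Or.inr (Or.inr h36))))
      · -- 0x10eed9 with `class_set = pcount = 0`: `0 < part_read`, `pass + 1 ≥ 1`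
        refine (head7 Lay hLay μ hμ u₀ hcode g hent (pass + 1) 0 0 v4 h7').trans ?_
        intro v5 h
        rcases h with ⟨hge, _⟩ | ⟨hp0, _⟩ | ⟨_, h35''⟩
        · omega
        · omega
        · -- 0x10faa1 with `i = 0`: `0 < classwords`, `0 < part_read`
          refine (head35 Lay hLay μ hμ u₀ hcode g hent (pass + 1) 0 0 0 v5 h35'').trans ?_
          intro v6 h
          rcases h with h30 | ⟨hex, _⟩
          · exact ReachVia.done (Or.inr (Or.inr (Or.inr (Or.inl h30))))
          · omega
    · -- pass 0: the j-loop 2261 of the next class word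
      exact ReachVia.done (Or.inr (Or.inl ⟨hp0, h28⟩))
    · -- a pass ≥ 1: 0x10faa1 with `i = 0`
      have heq := h35'.wi.inner.pcount_eq
      have hst := h35'.wi.inner.start_lt
      refine (head35 Lay hLay μ hμ u₀ hcode g hent pass (cs + 1) 0 (pcount + 1) v3 h35').trans ?_
      intro v4 h
      rcases h with h30 | ⟨hex, _⟩
      · exact ReachVia.done (Or.inr (Or.inr (Or.inl ⟨hp1, h30⟩)))
      · omega

end Vorbis.Spec.decode_residue_8

/-- Segment 8 of `decode_residue` (path B control) takes each of its three entry assertions to one of its exit assertions. -/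
theorem Vorbis.Spec.Worked.decode_residue_8_ok : Vorbis.Spec.decode_residue_8.Statement := by
  unfold Vorbis.Spec.decode_residue_8.Statement
  intro Lay hLay μ hμ u₀ hcode g hent
  refine ⟨?_, ?_, ?_⟩
  · intro v hat
    exact Vorbis.Spec.decode_residue_8.seg8_entry1 Lay hLay μ hμ u₀ hcode g hent v hat
  · intro cs pcount v hat
    exact Vorbis.Spec.decode_residue_8.seg8_entry2 Lay hLay μ hμ u₀ hcode g hent cs pcount v hat
  · intro pass cs i pcount v hat
    exact Vorbis.Spec.decode_residue_8.seg8_entry3 Lay hLay μ hμ u₀ hcode g hent pass cs i pcount v hat
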